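-- pv_equiv track=rewrite | github.com/AriaDesta2083/ftsc | FTSC.py | FuzzyLogicRelationship
-- ===== SOURCE A (Python) =====
-- def FuzzyLogicRelationship(fuzzifikasi):
--     flr = []
--     for i in range(len(fuzzifikasi)):
--         if i == 0:
--             x = f" → {fuzzifikasi[i]}"
--             flr.append(x)
--         else:
--             y = f"{fuzzifikasi[i-1]} → {fuzzifikasi[i]}"
--             flr.append(y)
--     return flr
-- ===== SOURCE B (Python) =====
-- def FuzzyLogicRelationship(fuzzifikasi):
--     # Build the relationship strings back-to-front: walk the list in REVERSE,
--     # pairing each element with its already-seen successor, then reverse once.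
--     out = []
--     nxt = None
--     for cur in reversed(fuzzifikasi):
--         if nxt is not None:
--             out.append(f"{cur} → {nxt}")
--         nxt = cur
--     if nxt is not None:
--         out.append(f" → {nxt}")
--     out.reverse()
--     return out
-- ===== Notes on version B (the rewrite author's own statement) =====
-- stated objective: alternative
-- what changed: B traverses the list in reverse, pairing each element with its successor and building the output back-to-front (with the head's ' -> x0' entry added last), then reverses once; A scans forward by index with an i == 0 special case.
import Mathlib
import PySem

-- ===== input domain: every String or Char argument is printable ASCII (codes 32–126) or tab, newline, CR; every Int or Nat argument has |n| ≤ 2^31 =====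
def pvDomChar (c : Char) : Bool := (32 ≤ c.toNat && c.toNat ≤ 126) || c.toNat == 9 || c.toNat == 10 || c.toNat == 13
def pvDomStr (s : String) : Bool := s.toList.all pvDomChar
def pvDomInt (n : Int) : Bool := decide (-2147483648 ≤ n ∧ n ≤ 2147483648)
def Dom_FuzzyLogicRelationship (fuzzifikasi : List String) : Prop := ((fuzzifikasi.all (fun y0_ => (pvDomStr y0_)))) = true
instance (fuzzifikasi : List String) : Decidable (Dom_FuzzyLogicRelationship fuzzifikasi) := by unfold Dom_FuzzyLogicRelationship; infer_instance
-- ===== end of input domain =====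

-- B builds the result back-to-front over the REVERSED list, pairing each element with
-- its successor (the head's " → x0" entry is appended last), then reverses once;
-- objective: an alternative traversal, no index arithmetic and no i == 0 branch.

-- ===== PORT A =====
-- index loop over range(len(fuzzifikasi)); indices are always in range, so pyGetD's default is never used
def FuzzyLogicRelationship (fuzzifikasi : List String) : List String :=
  (PySem.List.pyRange 0 fuzzifikasi.length 1).foldl
    (fun flr i =>
      if i == 0 then
        flr ++ [" → " ++ PySem.List.pyGetD fuzzifikasi i ""]
      else
        flr ++ [PySem.List.pyGetD fuzzifikasi (i - 1) "" ++ " → " ++ PySem.List.pyGetD fuzzifikasi i ""])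
    []

-- ===== PORT B =====
-- for cur in reversed(fuzzifikasi): …   with state (out, nxt)
def FuzzyLogicRelationship_alt (fuzzifikasi : List String) : List String :=
  let st := fuzzifikasi.reverse.foldl
    (fun (s : List String × Option String) cur =>
      match s.2 with
      | some nxt => (s.1 ++ [cur ++ " → " ++ nxt], some cur)
      | none => (s.1, some cur))
    ([], none)
  let out := match st.2 with
    | some nxt => st.1 ++ [" → " ++ nxt]
    | none => st.1
  out.reverse

-- ===== PRECONDITION & SPEC =====
def Spec_FuzzyLogicRelationship (fuzzifikasi : List String) (out : List String) : Prop := out = FuzzyLogicRelationship_alt fuzzifikasi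
instance (fuzzifikasi : List String) (out : List String) : Decidable (Spec_FuzzyLogicRelationship fuzzifikasi out) := by unfold Spec_FuzzyLogicRelationship; infer_instance

-- ===== CLAIM (what is proved, stated in full; the proofs are below) =====
def Claim_equal_FuzzyLogicRelationship : Prop := ∀ (fuzzifikasi : List String), Dom_FuzzyLogicRelationship fuzzifikasi → Spec_FuzzyLogicRelationship fuzzifikasi (FuzzyLogicRelationship fuzzifikasi)

-- ===== LEMMAS AND PROOFS =====

-- the canonical value both ports compute: predecessor ("" for the head) → current
def pvCanon (fz : List String) : List String :=
  (("" :: fz).zip fz).map (fun p => p.1 ++ " → " ++ p.2)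

-- A as a map over natural indices
theorem portA_eq_map (fz : List String) :
    FuzzyLogicRelationship fz =
      (List.range fz.length).map (fun k =>
        if k = 0 then " → " ++ fz.getD k ""
        else fz.getD (k - 1) "" ++ " → " ++ fz.getD k "") := by
  unfold FuzzyLogicRelationship
  have hfun : (fun (flr : List String) (i : Int) =>
      if i == 0 then flr ++ [" → " ++ PySem.List.pyGetD fz i ""]
      else flr ++ [PySem.List.pyGetD fz (i - 1) "" ++ " → " ++ PySem.List.pyGetD fz i ""]) =
      (fun flr i => flr ++ [if i == 0 then " → " ++ PySem.List.pyGetD fz i ""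
        else PySem.List.pyGetD fz (i - 1) "" ++ " → " ++ PySem.List.pyGetD fz i ""]) := by
    funext flr i; split <;> rfl
  rw [hfun, PySem.List.foldl_append_singleton_eq_map, PySem.List.pyRange_one]
  simp only [List.nil_append, List.map_map, Int.sub_zero]
  simp only [Int.toNat_natCast]
  apply List.map_congr_left
  intro k hk
  simp only [Function.comp, zero_add, beq_iff_eq, Nat.cast_eq_zero,
    PySem.List.pyGetD_natCast]
  by_cases h0 : k = 0
  · simp [h0]
  · have : (k : Int) - 1 = ((k - 1 : Nat) : Int) := by omega
    rw [if_neg h0, this, PySem.List.pyGetD_natCast, if_neg h0]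

-- A equals the canonical list
theorem portA_eq_canon (fz : List String) : FuzzyLogicRelationship fz = pvCanon fz := by
  rw [portA_eq_map]
  unfold pvCanon
  apply List.ext_getElem
  · simp
  · intro k h1 h2
    simp only [List.getElem_map, List.getElem_range, List.getElem_zip]
    simp only [List.length_map, List.length_range] at h1
    by_cases h0 : k = 0
    · subst h0
      cases fz with
      | nil => simp at h1
      | cons a l => simp
    · rw [if_neg h0]
      have hgk : fz.getD k "" = fz[k] := List.getD_eq_getElem fz "" h1
      have hgk1 : fz.getD (k - 1) "" = fz[k - 1] := List.getD_eq_getElem fz "" (by omega)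
      have hc : ("" :: fz)[k]'(by simpa using Nat.lt_succ_of_lt h1) = fz[k - 1] := by
        cases fz with
        | nil => simp at h1
        | cons a l =>
          rcases Nat.exists_eq_succ_of_ne_zero h0 with ⟨m, rfl⟩
          simp
      rw [hgk, hgk1, hc]

-- B's fold over the reversed list, characterised on the ORIGINAL list via foldr:
-- state = (adjacent-pair strings in reverse order, head of the list)
theorem altFold_eq (fz : List String) :
    fz.reverse.foldl
      (fun (s : List String × Option String) cur =>
        match s.2 with
        | some nxt => (s.1 ++ [cur ++ " → " ++ nxt], some cur)
        | none => (s.1, some cur))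
      ([], none)
    = (((fz.zip fz.tail).map (fun p => p.1 ++ " → " ++ p.2)).reverse, fz.head?) := by
  rw [List.foldl_reverse]
  induction fz with
  | nil => rfl
  | cons a l ih =>
    rw [List.foldr_cons, ih]
    cases l with
    | nil => rfl
    | cons b m => simp

-- B equals the canonical list
theorem portB_eq_canon (fz : List String) : FuzzyLogicRelationship_alt fz = pvCanon fz := by
  unfold FuzzyLogicRelationship_alt
  rw [altFold_eq]
  cases fz with
  | nil => rfl
  | cons a l =>
    simp only [List.head?_cons]
    unfold pvCanon
    simp [List.zip]

-- ===== VERDICT (by name: the statement is the Claim_ definition above) =====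
theorem FuzzyLogicRelationship_spec : Claim_equal_FuzzyLogicRelationship := by
  intro fz _
  unfold Spec_FuzzyLogicRelationship
  rw [portA_eq_canon, portB_eq_canon]
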